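-- pv_equiv track=rewrite | github.com/Alputer/University-Projects | CMPE300 - Analysis of Algorithms/Project1/AlpTuna.py | Example
-- ===== SOURCE A (Python) =====
-- def Example(X):
--     n = len(X)
--     y = 0
--     for i in range(n):
--         if X[i] == 0:
--             for j in range(i, n):
--                 k = n
--                 while k > 1:
--                     y = y + 1
--                     k = k//2
--         else:
--             for m in range(i, n):
--                 for t in range(1, n+1):
--                     x = n
--                     while x > 0:
--                         x = x - t
--                         y = y + 1
--     return y
-- ===== SOURCE B (Python) =====
-- def Example(X):
--     n = len(X)
--     zero_w = 0
--     k = n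
--     while k > 1:
--         zero_w += 1
--         k //= 2
--     nonzero_w = sum(-(-n // t) for t in range(1, n + 1))
--     return sum((n - i) * (zero_w if v == 0 else nonzero_w) for i, v in enumerate(X))
-- ===== Notes on version B (the rewrite author's own statement) =====
-- stated objective: faster
-- what changed: Replaces the O(n^3 log n) nested re-execution of the inner loops by precomputing the two per-index weights once (the halving count in O(log n) and the sum of ceiling divisions via -(-n//t) in O(n)) and a single weighted pass over enumerate(X).
import Mathlib
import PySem

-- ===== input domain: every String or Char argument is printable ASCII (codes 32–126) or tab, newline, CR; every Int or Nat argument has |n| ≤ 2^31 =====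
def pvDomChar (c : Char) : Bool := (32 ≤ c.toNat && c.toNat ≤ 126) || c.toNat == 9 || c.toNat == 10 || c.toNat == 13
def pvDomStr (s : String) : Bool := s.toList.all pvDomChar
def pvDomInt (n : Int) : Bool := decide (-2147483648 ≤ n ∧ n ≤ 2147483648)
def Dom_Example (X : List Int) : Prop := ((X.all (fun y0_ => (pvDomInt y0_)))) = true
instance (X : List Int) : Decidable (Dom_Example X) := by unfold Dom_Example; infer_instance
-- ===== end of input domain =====

-- B precomputes the two loop weights once and does one weighted pass; proved equal to A's nested loops.

-- ===== PORT A =====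
-- while k > 1: y += 1; k = k//2
def loopK (k y : Int) : Int :=
  if h : 1 < k then loopK (PySem.Int.floordiv k 2) (y + 1) else y
termination_by k.toNat
decreasing_by
  rw [PySem.Int.floordiv_eq_ediv_of_pos (by omega : (0:Int) < 2)]
  omega

-- x = n; while x > 0: x -= t; y += 1   (the guard 0 < t only makes the recursion total; A only calls it with t ≥ 1)
def loopX (t x y : Int) : Int :=
  if h : 0 < x ∧ 0 < t then loopX t (x - t) (y + 1) else y
termination_by x.toNat
decreasing_by omega

def Example (X : List Int) : Int :=
  let n : Int := PySem.List.len X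
  (PySem.List.pyRange 0 n 1).foldl (fun y i =>
    if PySem.List.pyGetD X i 0 == 0 then
      (PySem.List.pyRange i n 1).foldl (fun y _ => loopK n y) y
    else
      (PySem.List.pyRange i n 1).foldl (fun y _ =>
        (PySem.List.pyRange 1 (n + 1) 1).foldl (fun y t => loopX t n y) y) y) 0

-- ===== PORT B =====
-- zero_w = 0; k = n; while k > 1: zero_w += 1; k //= 2
def bHalve (zw k : Int) : Int :=
  if h : 1 < k then bHalve (zw + 1) (PySem.Int.floordiv k 2) else zw
termination_by k.toNat
decreasing_by
  rw [PySem.Int.floordiv_eq_ediv_of_pos (by omega : (0:Int) < 2)]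
  omega

def Example_alt (X : List Int) : Int :=
  let n : Int := PySem.List.len X
  let zeroW := bHalve 0 n
  let nonzeroW := ((PySem.List.pyRange 1 (n + 1) 1).map
    (fun t => -(PySem.Int.floordiv (-n) t))).sum
  ((PySem.List.enumerate X 0).map
    (fun p => (n - p.1) * (if p.2 == 0 then zeroW else nonzeroW))).sum

-- ===== PRECONDITION & SPEC =====
def Spec_Example (X : List Int) (out : Int) : Prop := out = Example_alt X
instance (X : List Int) (out : Int) : Decidable (Spec_Example X out) := by unfold Spec_Example; infer_instance

-- ===== CLAIM (what is proved, stated in full; the proofs are below) =====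
def Claim_equal_Example : Prop := ∀ (X : List Int), Dom_Example X → Spec_Example X (Example X)

-- ===== LEMMAS AND PROOFS =====

theorem loopK_shift (k y : Int) : loopK k y = y + loopK k 0 := by
  have H : ∀ m : Nat, ∀ k : Int, k.toNat ≤ m → ∀ y : Int, loopK k y = y + loopK k 0 := by
    intro m
    induction m with
    | zero =>
      intro k hk y
      have h : ¬ 1 < k := by omega
      rw [loopK, dif_neg h, loopK, dif_neg h]
      ring
    | succ m ih =>
      intro k hk y
      by_cases h : 1 < k
      · have hfd : PySem.Int.floordiv k 2 = k / 2 :=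
          PySem.Int.floordiv_eq_ediv_of_pos (by omega)
        have hle : (PySem.Int.floordiv k 2).toNat ≤ m := by rw [hfd]; omega
        rw [loopK, dif_pos h, ih _ hle]
        conv_rhs => rw [loopK, dif_pos h, ih _ hle]
        ring
      · rw [loopK, dif_neg h, loopK, dif_neg h]
        ring
  exact H k.toNat k le_rfl y

theorem bHalve_eq (zw k : Int) : bHalve zw k = zw + loopK k 0 := by
  have H : ∀ m : Nat, ∀ k : Int, k.toNat ≤ m → ∀ zw : Int, bHalve zw k = zw + loopK k 0 := by
    intro m
    induction m with
    | zero =>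
      intro k hk zw
      have h : ¬ 1 < k := by omega
      rw [bHalve, dif_neg h, loopK, dif_neg h]
      ring
    | succ m ih =>
      intro k hk zw
      by_cases h : 1 < k
      · have hfd : PySem.Int.floordiv k 2 = k / 2 :=
          PySem.Int.floordiv_eq_ediv_of_pos (by omega)
        have hle : (PySem.Int.floordiv k 2).toNat ≤ m := by rw [hfd]; omega
        rw [bHalve, dif_pos h, ih _ hle]
        conv_rhs => rw [loopK, dif_pos h]
        rw [loopK_shift (PySem.Int.floordiv k 2) (0 + 1)]
        ring
      · rw [bHalve, dif_neg h, loopK, dif_neg h]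
        ring
  exact H k.toNat k le_rfl zw

theorem loopX_shift (t x y : Int) : loopX t x y = y + loopX t x 0 := by
  have H : ∀ m : Nat, ∀ x : Int, x.toNat ≤ m → ∀ y : Int, loopX t x y = y + loopX t x 0 := by
    intro m
    induction m with
    | zero =>
      intro x hx y
      by_cases h : 0 < x ∧ 0 < t
      · omega
      · rw [loopX, dif_neg h, loopX, dif_neg h]; ring
    | succ m ih =>
      intro x hx y
      by_cases h : 0 < x ∧ 0 < t
      · have hle : (x - t).toNat ≤ m := by omega
        rw [loopX, dif_pos h, ih _ hle]
        conv_rhs => rw [loopX, dif_pos h, ih _ hle]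
        ring
      · rw [loopX, dif_neg h, loopX, dif_neg h]; ring
  exact H x.toNat x le_rfl y

theorem loopX_bounds (t : Int) (ht : 0 < t) :
    ∀ (x : Int), 0 ≤ x → (loopX t x 0 - 1) * t < x ∧ x ≤ loopX t x 0 * t := by
  have H : ∀ m : Nat, ∀ x : Int, x.toNat ≤ m → 0 ≤ x →
      (loopX t x 0 - 1) * t < x ∧ x ≤ loopX t x 0 * t := by
    intro m
    induction m with
    | zero =>
      intro x hx h0
      have hx0 : x = 0 := by omega
      subst hx0
      rw [loopX]
      have h : ¬ ((0:Int) < 0 ∧ 0 < t) := by omega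
      rw [dif_neg h]
      constructor <;> nlinarith
    | succ m ih =>
      intro x hx h0
      by_cases h : 0 < x ∧ 0 < t
      · rw [loopX, dif_pos h, loopX_shift]
        by_cases h2 : 0 ≤ x - t
        · have hle : (x - t).toNat ≤ m := by omega
          obtain ⟨hb1, hb2⟩ := ih _ hle h2
          constructor <;> nlinarith
        · have hz : loopX t (x - t) 0 = 0 := by
            rw [loopX, dif_neg (by omega)]
          rw [hz]
          constructor <;> nlinarith
      · have hx0 : x = 0 := by omega
        subst hx0
        rw [loopX, dif_neg h]
        constructor <;> nlinarith
  intro x hx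
  exact H x.toNat x le_rfl hx

theorem loopX_ceil (t x : Int) (ht : 0 < t) (hx : 0 ≤ x) :
    loopX t x 0 = -(PySem.Int.floordiv (-x) t) := by
  obtain ⟨h1, h2⟩ := loopX_bounds t ht x hx
  exact ((PySem.Int.neg_floordiv_neg_eq_iff_of_pos ht).mpr ⟨h1, h2⟩).symm

-- ===== VERDICT (by name: the statement is the Claim_ definition above) =====
theorem Example_spec : Claim_equal_Example := by
  unfold Claim_equal_Example Spec_Example
  intro X _
  simp only [Example, Example_alt]
  set n : Int := PySem.List.len X with hn
  have hn0 : 0 ≤ n := by simp [hn, PySem.List.len]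
  set nzw : Int := ((PySem.List.pyRange 1 (n + 1) 1).map
    (fun t => -(PySem.Int.floordiv (-n) t))).sum with hnzw
  have hS : ((PySem.List.pyRange 1 (n + 1) 1).map (fun t => loopX t n 0)).sum = nzw := by
    rw [hnzw]
    refine congrArg List.sum (List.map_congr_left ?_)
    intro t htm
    obtain ⟨h1, h2⟩ := (PySem.List.mem_pyRange_one).mp htm
    exact loopX_ceil t n (by omega) hn0
  have hinK : ∀ y, loopK n y = y + bHalve 0 n := by
    intro y
    rw [loopK_shift, bHalve_eq]
    ring
  have hinX : ∀ y : Int,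
      (PySem.List.pyRange 1 (n + 1) 1).foldl (fun y t => loopX t n y) y = y + nzw := by
    intro y
    rw [PySem.List.foldl_congr_mem _ _ (fun y t => y + loopX t n 0) _
      (by intro acc x hx; exact loopX_shift x n acc)]
    rw [PySem.List.foldl_add, hS]
  have hcast : ∀ i : Int, 0 ≤ i → i < n → (((n - i).toNat : Int)) = n - i := by
    intro i h0 h1; omega
  have houter : ∀ acc i, i ∈ PySem.List.pyRange 0 n 1 →
      (if PySem.List.pyGetD X i 0 == 0 then
        (PySem.List.pyRange i n 1).foldl (fun y _ => loopK n y) acc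
      else
        (PySem.List.pyRange i n 1).foldl (fun y _ =>
          (PySem.List.pyRange 1 (n + 1) 1).foldl (fun y t => loopX t n y) y) acc)
      = acc + (n - i) * (if PySem.List.pyGetD X i 0 == 0 then bHalve 0 n else nzw) := by
    intro acc i him
    obtain ⟨h0, h1⟩ := (PySem.List.mem_pyRange_one).mp him
    by_cases hz : (PySem.List.pyGetD X i 0 == 0) = true
    · rw [if_pos hz, if_pos hz]
      rw [PySem.List.foldl_congr_mem _ _ (fun y _ => y + bHalve 0 n) _
        (by intro a x hx; exact hinK a)]
      rw [PySem.List.foldl_add, PySem.List.sum_map_const_int,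
        PySem.List.length_pyRange_one, hcast i h0 h1]
    · rw [if_neg hz, if_neg hz]
      rw [PySem.List.foldl_congr_mem _ _ (fun y _ => y + nzw) _
        (by intro a x hx; exact hinX a)]
      rw [PySem.List.foldl_add, PySem.List.sum_map_const_int,
        PySem.List.length_pyRange_one, hcast i h0 h1]
  rw [PySem.List.foldl_congr_mem _ _
    (fun acc i => acc + (n - i) * (if PySem.List.pyGetD X i 0 == 0 then bHalve 0 n else nzw)) _
    (by intro acc i him; exact houter acc i him)]
  rw [PySem.List.foldl_add, zero_add]
  rw [PySem.List.enumerate_eq_map_pyRange (d := 0), List.map_map]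
  rfl
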